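-- pv_equiv track=rewrite | github.com/joshbart/scratch_for_automate_the_boring_stuff | Chapter 4/coin_flip_streaks.py | check_for_streaks
-- ===== SOURCE A (Python) =====
-- def check_for_streaks(list):
--     streaks = 0
--     for index, flip_value in enumerate(list):
--         if flip_value == 'H':
--             compare_list = ['H'] * 6
--         else:
--             compare_list = ['T'] * 6
--         if compare_list == list[index:index + 6]:
--             streaks += 1
--     return streaks
-- ===== SOURCE B (Python) =====
-- def check_for_streaks(list):
--     total = 0
--     run = 0
--     prev = None
--     for v in list:
--         run = run + 1 if v == prev else 1
--         prev = v
--         if run >= 6 and (v == 'H' or v == 'T'):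
--             total += 1
--     return total
-- ===== Notes on version B (the rewrite author's own statement) =====
-- stated objective: faster
-- what changed: Replaces the per-index 6-element window construction and slice comparison with a single run-length pass: track the current flip and its consecutive count and count a streak each time the run length reaches 6 or more (for 'H'/'T' values only); constant work and no list allocations per element.
import Mathlib
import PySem

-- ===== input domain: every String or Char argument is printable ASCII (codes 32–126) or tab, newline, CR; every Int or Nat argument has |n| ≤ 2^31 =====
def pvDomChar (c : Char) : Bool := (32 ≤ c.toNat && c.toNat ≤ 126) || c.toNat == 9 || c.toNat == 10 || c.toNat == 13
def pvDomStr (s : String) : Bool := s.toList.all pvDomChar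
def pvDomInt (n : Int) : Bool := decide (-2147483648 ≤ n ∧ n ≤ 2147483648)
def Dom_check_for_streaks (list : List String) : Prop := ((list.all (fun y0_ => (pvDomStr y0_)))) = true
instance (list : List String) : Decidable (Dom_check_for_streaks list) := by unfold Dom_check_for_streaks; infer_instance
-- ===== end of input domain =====

-- B replaces A's per-index 6-element window build + slice comparison with a single run-length pass (same O(n) asymptotics, measurably faster by constant factor: no per-element list allocation).


-- ===== PORT A =====
def check_for_streaks (list : List String) : Int :=
  (PySem.List.enumerate list 0).foldl
    (fun streaks p =>
      let compare_list := if p.2 = "H" then List.replicate 6 "H" else List.replicate 6 "T"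
      if compare_list = PySem.List.slice list (some p.1) (some (p.1 + 6)) then streaks + 1
      else streaks) 0

-- ===== PORT B =====
-- state: (prev, run, total)
def pvBStep (st : Option String × Int × Int) (v : String) : Option String × Int × Int :=
  let run : Int := if st.1 = some v then st.2.1 + 1 else 1
  let total : Int := if 6 ≤ run ∧ (v = "H" ∨ v = "T") then st.2.2 + 1 else st.2.2
  (some v, run, total)

def check_for_streaks_alt (list : List String) : Int :=
  (list.foldl pvBStep (none, 0, 0)).2.2

-- ===== PRECONDITION & SPEC =====
def Spec_check_for_streaks (list : List String) (out : Int) : Prop := out = check_for_streaks_alt list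
instance (list : List String) (out : Int) : Decidable (Spec_check_for_streaks list out) := by unfold Spec_check_for_streaks; infer_instance

-- ===== CLAIM (what is proved, stated in full; the proofs are below) =====
def Claim_equal_check_for_streaks : Prop := ∀ (list : List String), Dom_check_for_streaks list → Spec_check_for_streaks list (check_for_streaks list)

-- ===== LEMMAS AND PROOFS =====

-- reference count: number of window start positions whose 6-window matches A's compare_list
def pvW : List String → Int
  | [] => 0
  | x :: xs =>
      (if (if x = "H" then List.replicate 6 "H" else List.replicate 6 "T") = (x :: xs).take 6 then 1 else 0)
      + pvW xs

def pvBad (p : String) (k : Nat) : Int :=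
  if p = "H" ∨ p = "T" then max 0 ((k : Int) - 5) else 0

-- the head indicator, characterized
lemma pvInd_char (x : String) (xs : List String) :
    ((if x = "H" then List.replicate 6 "H" else List.replicate 6 "T") = (x :: xs).take 6)
      ↔ ((x = "H" ∨ x = "T") ∧ (x :: xs).take 6 = List.replicate 6 x) := by
  by_cases hx : x = "H"
  · subst hx; simp [eq_comm]
  · simp only [if_neg hx]
    constructor
    · intro h
      have hxT : x = "T" := by
        have := congrArg (fun l => l.head?) h
        simpa [List.take_succ_cons] using this.symm
      exact ⟨Or.inr hxT, by rw [← hxT] at h; exact h.symm⟩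
    · rintro ⟨hHT, h⟩
      rcases hHT with h1 | h1
      · exact absurd h1 hx
      · rw [h, h1]

lemma pvTake_replicate_cons (k : Nat) (p : String) (l : List String) :
    (List.replicate k p ++ l).take 6 =
      List.replicate (min 6 k) p ++ l.take (6 - k) := by
  rw [List.take_append, List.take_replicate, List.length_replicate]

-- count of windows inside a pure run
lemma pvW_replicate (k : Nat) (p : String) :
    pvW (List.replicate k p) = pvBad p k := by
  induction k with
  | zero => simp [pvW, pvBad]
  | succ k ih =>
    rw [List.replicate_succ]
    show (if _ then (1:Int) else 0) + pvW (List.replicate k p) = _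
    rw [ih, if_congr (pvInd_char p (List.replicate k p)) rfl rfl]
    have htake : (p :: List.replicate k p).take 6 = List.replicate (min 6 (k+1)) p := by
      rw [← List.replicate_succ, List.take_replicate]
    rw [htake]
    have hiff : (List.replicate (min 6 (k+1)) p = List.replicate 6 p) ↔ 6 ≤ k + 1 := by
      constructor
      · intro h
        have := congrArg List.length h
        simp at this; omega
      · intro h
        have : min 6 (k+1) = 6 := by omega
        rw [this]
    by_cases hHT : p = "H" ∨ p = "T"
    · by_cases h6 : 6 ≤ k + 1
      · rw [if_pos ⟨hHT, hiff.mpr h6⟩]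
        simp only [pvBad, if_pos hHT]
        omega
      · rw [if_neg (fun hc => h6 (hiff.mp hc.2))]
        simp only [pvBad, if_pos hHT]
        omega
    · rw [if_neg (fun hc => hHT hc.1)]
      simp [pvBad, hHT]

-- windows cannot cross a value change
lemma pvW_run_boundary (k : Nat) (p x : String) (xs : List String) (hne : x ≠ p) :
    pvW (List.replicate k p ++ x :: xs) = pvBad p k + pvW (x :: xs) := by
  induction k with
  | zero => simp [pvBad]
  | succ k ih =>
    rw [List.replicate_succ, List.cons_append]
    show (if _ then (1:Int) else 0) + pvW (List.replicate k p ++ x :: xs) = _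
    rw [ih]
    rw [if_congr (pvInd_char p (List.replicate k p ++ x :: xs)) rfl rfl]
    have hl : (p :: (List.replicate k p ++ x :: xs)) = List.replicate (k+1) p ++ x :: xs := rfl
    rw [hl]
    have hstep :
        (if ((p = "H" ∨ p = "T") ∧ (List.replicate (k+1) p ++ x :: xs).take 6 = List.replicate 6 p)
            then (1:Int) else 0)
          = pvBad p (k+1) - pvBad p k := by
      by_cases hHT : p = "H" ∨ p = "T"
      · by_cases h6 : 6 ≤ k + 1
        · have : (List.replicate (k+1) p ++ x :: xs).take 6 = List.replicate 6 p := by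
            rw [pvTake_replicate_cons]
            have h1 : min 6 (k+1) = 6 := by omega
            have h2 : 6 - (k+1) = 0 := by omega
            rw [h1, h2]; simp
          rw [if_pos ⟨hHT, this⟩]
          simp only [pvBad, if_pos hHT]; omega
        · have : ¬ ((List.replicate (k+1) p ++ x :: xs).take 6 = List.replicate 6 p) := by
            intro h
            rw [pvTake_replicate_cons] at h
            have h1 : min 6 (k+1) = k + 1 := by omega
            rw [h1] at h
            have hx : x ∈ List.replicate 6 p := by
              rw [← h]
              refine List.mem_append_right _ ?_
              have : 1 ≤ 6 - (k+1) := by omega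
              cases h2 : (6 - (k+1)) with
              | zero => omega
              | succ m => simp [List.take_succ_cons]
            exact hne (List.eq_of_mem_replicate hx)
          rw [if_neg (fun hc => this hc.2)]
          simp only [pvBad, if_pos hHT]; omega
      · rw [if_neg (fun hc => hHT hc.1)]
        simp [pvBad, hHT]
    rw [hstep]; ring

-- B's loop invariant: with a pending run of p of length k, the fold adds exactly
-- the windows of (replicate k p ++ l) that end inside l
lemma pvB_invariant (l : List String) (p : String) (k : Nat) (t : Int) :
    (l.foldl pvBStep (some p, (k : Int), t)).2.2
      = t + pvW (List.replicate k p ++ l) - pvBad p k := by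
  induction l generalizing p k t with
  | nil => simp [pvW_replicate]
  | cons x xs ih =>
    by_cases hxp : x = p
    · subst hxp
      have hstep : pvBStep (some x, (k : Int), t) x
          = (some x, ((k+1 : Nat) : Int), if 6 ≤ (k:Int) + 1 ∧ (x = "H" ∨ x = "T") then t + 1 else t) := by
        simp [pvBStep]
      rw [List.foldl_cons, hstep, ih]
      have hlist : List.replicate k x ++ x :: xs = List.replicate (k+1) x ++ xs := by
        simp [List.replicate_succ']
      rw [hlist]
      by_cases hHT : x = "H" ∨ x = "T"
      · by_cases h6 : 6 ≤ (k:Int) + 1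
        · rw [if_pos ⟨h6, hHT⟩]
          simp only [pvBad, if_pos hHT]; push_cast; omega
        · rw [if_neg (fun hc => h6 hc.1)]
          simp only [pvBad, if_pos hHT]; push_cast; omega
      · rw [if_neg (fun hc => hHT hc.2)]
        simp only [pvBad, if_neg hHT]
    · have hstep : pvBStep (some p, (k : Int), t) x = (some x, ((1:Nat) : Int), t) := by
        simp only [pvBStep]
        rw [if_neg (by simpa [eq_comm] using hxp)]
        norm_num
      rw [List.foldl_cons, hstep, ih]
      have h1 : List.replicate 1 x ++ xs = x :: xs := by simp
      rw [h1, pvW_run_boundary k p x xs hxp]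
      have h0 : pvBad x 1 = 0 := by
        simp only [pvBad]; split_ifs <;> norm_num
      rw [h0]; ring

lemma pvB_eq_W (l : List String) : check_for_streaks_alt l = pvW l := by
  cases l with
  | nil => rfl
  | cons x xs =>
    unfold check_for_streaks_alt
    rw [List.foldl_cons]
    have hstep : pvBStep (none, 0, 0) x = (some x, ((1:Nat) : Int), 0) := by
      simp [pvBStep]
    rw [hstep, pvB_invariant xs x 1 0]
    simp [pvBad]

-- A's loop invariant: full.drop s = l ties the slice at index s+k to the k-th suffix of l
lemma pvA_invariant (l full : List String) (s : Nat) (t : Int) (h : full.drop s = l) :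
    ((PySem.List.enumerate l (s : Int)).foldl
      (fun streaks p =>
        let compare_list := if p.2 = "H" then List.replicate 6 "H" else List.replicate 6 "T"
        if compare_list = PySem.List.slice full (some p.1) (some (p.1 + 6)) then streaks + 1
        else streaks) t)
      = t + pvW l := by
  induction l generalizing s t with
  | nil => simp [pvW]
  | cons x xs ih =>
    rw [PySem.List.enumerate_cons, List.foldl_cons]
    have hslice : PySem.List.slice full (some (s : Int)) (some ((s : Int) + 6)) = (x :: xs).take 6 := by
      rw [show ((s : Int) + 6) = ((s : Int) + ((6 : Nat) : Int)) by norm_num]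
      rw [PySem.List.slice_natCast_add, h]
    have hdrop : full.drop (s + 1) = xs := by
      rw [← List.tail_drop, h]; rfl
    have hcast : ((s : Int) + 1) = (((s + 1 : Nat)) : Int) := by push_cast; ring
    simp only [hslice, hcast]
    rw [ih (s+1) _ hdrop]
    show (if _ then t + 1 else t) + pvW xs = t + ((if _ then (1:Int) else 0) + pvW xs)
    split_ifs <;> ring

lemma pvA_eq_W (l : List String) : check_for_streaks l = pvW l := by
  unfold check_for_streaks
  have := pvA_invariant l l 0 0 (by simp)
  simpa using this

-- ===== VERDICT (by name: the statement is the Claim_ definition above) =====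
theorem check_for_streaks_spec : Claim_equal_check_for_streaks := by
  intro list _
  unfold Spec_check_for_streaks
  rw [pvA_eq_W, pvB_eq_W]
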